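-- pv_equiv track=rewrite | github.com/leoperezz/GoalReducerWithLoopRemoval | src/core/policy/golsav2_discrete.py | remove_loops
-- ===== SOURCE A (Python) =====
-- from typing import List
--
-- def remove_loops(arr):
--     # import ipdb; ipdb.set_trace() # fmt: off
--     clean_a: List[int] = []
--     clean_a_ids: List[int] = []
--
--     for aid, a_ele in enumerate(arr):
--         if a_ele not in clean_a:
--             clean_a.append(a_ele)
--             clean_a_ids.append(aid)
--         else:
--             a_ele_idx = clean_a.index(a_ele)
--             clean_a = clean_a[: a_ele_idx + 1]
--
--             clean_a_ids = clean_a_ids[: a_ele_idx + 1]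
--     return clean_a, clean_a_ids
-- ===== SOURCE B (Python) =====
-- def remove_loops(arr):
--     # Collapse-and-restart: repeatedly find the FIRST repeated value, splice the looped
--     # segment out of the (index, value) pair list, and rescan, until no repeat remains.
--     pairs = list(enumerate(arr))
--     while True:
--         seen = {}
--         for k, (_, v) in enumerate(pairs):
--             if v in seen:
--                 pairs = pairs[: seen[v] + 1] + pairs[k + 1 :]
--                 break
--             seen[v] = k
--         else:
--             break
--     clean_a = [v for _, v in pairs]
--     clean_a_ids = [i for i, _ in pairs]
--     return clean_a, clean_a_ids
-- ===== Notes on version B (the rewrite author's own statement) =====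
-- stated objective: alternative
-- what changed: Instead of A's single left-to-right pass that maintains and truncates an accumulator, B works on the materialized (index, value) pair list and repeatedly collapses the first loop in place (splicing out the looped segment) until no value repeats, then projects the two result lists.
import Mathlib
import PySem

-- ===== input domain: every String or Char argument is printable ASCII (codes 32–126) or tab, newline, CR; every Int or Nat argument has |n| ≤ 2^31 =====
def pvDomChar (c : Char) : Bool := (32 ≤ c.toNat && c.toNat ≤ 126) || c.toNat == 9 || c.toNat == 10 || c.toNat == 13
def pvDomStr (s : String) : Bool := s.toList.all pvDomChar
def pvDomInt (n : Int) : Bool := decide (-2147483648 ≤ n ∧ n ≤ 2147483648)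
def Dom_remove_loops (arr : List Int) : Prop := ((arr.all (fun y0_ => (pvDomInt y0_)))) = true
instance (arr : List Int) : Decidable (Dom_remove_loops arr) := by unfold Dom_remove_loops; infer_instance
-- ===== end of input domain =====

-- B replaces A's single accumulating pass by collapse-and-restart on the (index, value)
-- pair list: repeatedly splice out the first loop found until no value repeats ('alternative').

-- ===== PORT A =====
-- loop body of A: membership test on clean_a, then either append or truncate both lists at index+1
def rlStepA (st : List Int × List Int) (p : Int × Int) : List Int × List Int :=
  if p.2 ∉ st.1 then
    (st.1 ++ [p.2], st.2 ++ [p.1])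
  else
    let i : Nat := (PySem.List.index? st.1 p.2).getD 0
    (PySem.List.slice st.1 none (some ((i : Int) + 1)),
     PySem.List.slice st.2 none (some ((i : Int) + 1)))

def remove_loops (arr : List Int) : List Int × List Int :=
  (PySem.List.enumerate arr).foldl rlStepA ([], [])

-- ===== PORT B =====
-- inner for-loop of Source B: scan the pair list with the dict `seen` (value → position k),
-- returning the first repeat as (seen[v], k), or none if the loop finishes without break
def rlScan (ps : List (Int × Int)) (seen : PySem.Dict Int Nat) (k : Nat) : Option (Nat × Nat) :=
  match ps with
  | [] => none
  | p :: rest =>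
    match seen.get? p.2 with
    | some i => some (i, k)
    | none => rlScan rest (seen.insert p.2 k) (k + 1)

-- the scan reports a genuine repeat position: i < k and k inside the list (for termination)
theorem rlScan_lt (ps : List (Int × Int)) (seen : PySem.Dict Int Nat) (k0 i k : Nat)
    (hb : ∀ v n, seen.get? v = some n → n < k0)
    (h : rlScan ps seen k0 = some (i, k)) : i < k ∧ k0 ≤ k ∧ k < k0 + ps.length := by
  induction ps generalizing seen k0 with
  | nil => simp [rlScan] at h
  | cons p rest ih =>
    rw [rlScan] at h
    cases hg : seen.get? p.2 with
    | some j =>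
      rw [hg] at h
      simp only [Option.some.injEq, Prod.mk.injEq] at h
      obtain ⟨h1, h2⟩ := h
      have := hb _ _ hg
      simp only [List.length_cons]
      omega
    | none =>
      rw [hg] at h
      have := ih (seen.insert p.2 k0) (k0 + 1) (fun v n hv => by
        rw [PySem.Dict.get?_insert] at hv
        by_cases hvp : v = p.2
        · rw [if_pos hvp] at hv; simp only [Option.some.injEq] at hv; omega
        · rw [if_neg hvp] at hv; have := hb _ _ hv; omega) h
      simp only [List.length_cons]
      omega

-- the while-loop of Source B: scan; on a repeat splice out the looped segment and rescan,
-- otherwise stop.  pairs[:i+1] + pairs[k+1:] with i, k ≥ 0 is exactly take/drop.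
def rlLoop (ps : List (Int × Int)) : List (Int × Int) :=
  match h : rlScan ps PySem.Dict.empty 0 with
  | none => ps
  | some (i, k) => rlLoop (ps.take (i + 1) ++ ps.drop (k + 1))
termination_by ps.length
decreasing_by
  have := rlScan_lt ps PySem.Dict.empty 0 i k (by intro v n hv; simp [pysem] at hv) h
  simp only [List.length_append, List.length_take, List.length_drop]
  omega

def remove_loops_alt (arr : List Int) : List Int × List Int :=
  let pairs := rlLoop (PySem.List.enumerate arr)
  (pairs.map Prod.snd, pairs.map Prod.fst)

-- ===== PRECONDITION & SPEC =====
def Spec_remove_loops (arr : List Int) (out : List Int × List Int) : Prop := out = remove_loops_alt arr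
instance (arr : List Int) (out : List Int × List Int) : Decidable (Spec_remove_loops arr out) := by unfold Spec_remove_loops; infer_instance

-- ===== CLAIM (what is proved, stated in full; the proofs are below) =====
def Claim_equal_remove_loops : Prop := ∀ (arr : List Int), Dom_remove_loops arr → Spec_remove_loops arr (remove_loops arr)

-- ===== LEMMAS AND PROOFS =====

-- A's loop body re-expressed on the zipped (id, value) accumulator
def stepP (acc : List (Int × Int)) (p : Int × Int) : List (Int × Int) :=
  match PySem.List.index? (acc.map Prod.snd) p.2 with
  | none => acc ++ [p]
  | some i => acc.take (i + 1)

-- A's fold is the projection of the fold over the zipped accumulator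
theorem bridgeA (ps : List (Int × Int)) (acc : List (Int × Int)) :
    ps.foldl rlStepA (acc.map Prod.snd, acc.map Prod.fst) =
      ((ps.foldl stepP acc).map Prod.snd, (ps.foldl stepP acc).map Prod.fst) := by
  induction ps generalizing acc with
  | nil => simp
  | cons p rest ih =>
    rw [List.foldl_cons, List.foldl_cons, ← ih]
    congr 1
    by_cases hm : p.2 ∈ acc.map Prod.snd
    · obtain ⟨i, hi⟩ := Option.isSome_iff_exists.1
        ((PySem.List.index?_isSome_iff _ _).2 hm)
      have hcast : ((i : Int) + 1) = (((i + 1 : Nat)) : Int) := by push_cast; ring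
      simp only [rlStepA, stepP, hi, Option.getD_some, hcast,
        PySem.List.slice_to_natCast]
      rw [if_neg (not_not_intro hm)]
      simp [List.map_take]
    · have hn : PySem.List.index? (acc.map Prod.snd) p.2 = none :=
        (PySem.List.index?_eq_none_iff _ _).2 hm
      simp only [stepP, hn]
      simp [rlStepA, hm]

-- a list whose values are fresh and pairwise distinct is appended wholesale by the fold
theorem foldP_nodup (ps acc : List (Int × Int))
    (hnd : ((acc ++ ps).map Prod.snd).Nodup) :
    ps.foldl stepP acc = acc ++ ps := by
  induction ps generalizing acc with
  | nil => simp
  | cons p rest ih =>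
    have hm : p.2 ∉ acc.map Prod.snd := by
      simp only [List.map_append, List.nodup_append] at hnd
      exact fun hc => hnd.2.2 _ hc _ (by simp) rfl
    rw [List.foldl_cons, stepP, (PySem.List.index?_eq_none_iff _ _).2 hm,
      ih (acc ++ [p]) (by simpa using hnd)]
    simp

-- characterization of the scan: either all values (after the processed prefix) are distinct,
-- or it returns the first repeat (i, pref.length + j) with i the first index of ps[j].2
theorem rlScan_spec (ps pref : List (Int × Int)) (seen : PySem.Dict Int Nat)
    (hinv : ∀ v, seen.get? v = PySem.List.index? (pref.map Prod.snd) v)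
    (hnd : (pref.map Prod.snd).Nodup) :
    (rlScan ps seen pref.length = none → ((pref ++ ps).map Prod.snd).Nodup) ∧
    (∀ i k, rlScan ps seen pref.length = some (i, k) →
      ∃ (j : Nat) (hj : j < ps.length), k = pref.length + j ∧
        (((pref ++ ps.take j)).map Prod.snd).Nodup ∧
        PySem.List.index? ((pref ++ ps.take j).map Prod.snd) (ps[j].2) = some i) := by
  induction ps generalizing pref seen with
  | nil => exact ⟨fun _ => by simpa using hnd, fun i k h => by simp [rlScan] at h⟩
  | cons p rest ih =>
    cases hg : seen.get? p.2 with
    | some n =>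
      refine ⟨fun h => by simp [rlScan, hg] at h, fun i k h => ?_⟩
      rw [rlScan, hg] at h
      simp only [Option.some.injEq, Prod.mk.injEq] at h
      obtain ⟨h1, h2⟩ := h
      refine ⟨0, by simp, by omega, by simpa using hnd, ?_⟩
      simp only [List.take_zero, List.append_nil, List.getElem_cons_zero]
      rw [← hinv, hg, h1]
    | none =>
      have hm : p.2 ∉ pref.map Prod.snd := by
        rw [← PySem.List.index?_eq_none_iff, ← hinv]; exact hg
      have hinv' : ∀ v, (seen.insert p.2 pref.length).get? v =
          PySem.List.index? ((pref ++ [p]).map Prod.snd) v := by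
        intro v
        rw [PySem.Dict.get?_insert, List.map_append, List.map_singleton]
        by_cases hv : v = p.2
        · subst hv
          rw [if_pos rfl, PySem.List.index?_append_singleton_self _ _ hm, List.length_map]
        · rw [if_neg hv, hinv]
          by_cases hvm : v ∈ pref.map Prod.snd
          · rw [PySem.List.index?_append_of_mem _ hvm]
          · rw [(PySem.List.index?_eq_none_iff _ _).2 hvm,
              (PySem.List.index?_eq_none_iff _ _).2 (by simp [hvm, hv])]
      have hnd' : ((pref ++ [p]).map Prod.snd).Nodup := by
        rw [List.map_append, List.map_singleton]
        refine List.Nodup.append hnd (List.nodup_singleton _) ?_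
        intro a ha hb
        simp only [List.mem_singleton] at hb
        subst hb
        exact hm ha
      have hlen : (pref ++ [p]).length = pref.length + 1 := by simp
      obtain ⟨ihn, ihs⟩ := ih (pref ++ [p]) (seen.insert p.2 pref.length) hinv' hnd'
      constructor
      · intro h
        rw [rlScan, hg] at h
        have := ihn (by rw [hlen]; exact h)
        simpa using this
      · intro i k h
        rw [rlScan, hg] at h
        obtain ⟨j, hj, hk, hnd2, hidx⟩ := ihs i k (by rw [hlen]; exact h)
        refine ⟨j + 1, by simpa using hj, by simp at hk; omega, ?_, ?_⟩
        · simpa [List.append_assoc] using hnd2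
        · have : (pref ++ [p]) ++ rest.take j = pref ++ (p :: rest).take (j + 1) := by
            simp [List.append_assoc]
          rw [this] at hidx
          simpa using hidx

-- the collapse loop computes A's fold (over the zipped accumulator) from the empty state
theorem loop_eq (ps : List (Int × Int)) : ps.foldl stepP [] = rlLoop ps := by
  rw [rlLoop]
  split
  case h_1 h =>
    have := (rlScan_spec ps [] PySem.Dict.empty
      (by intro v; simp [pysem, PySem.List.index?]) (by simp)).1 (by simpa using h)
    exact foldP_nodup ps [] (by simpa using this)
  case h_2 i k h =>
    obtain ⟨j, hj, hk, hnd, hidx⟩ := (rlScan_spec ps [] PySem.Dict.empty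
      (by intro v; simp [pysem, PySem.List.index?]) (by simp)).2 i k (by simpa using h)
    simp only [List.nil_append, List.length_nil, Nat.zero_add] at hk hnd hidx
    subst hk
    -- i is the index of the repeated value inside the scanned prefix, so i < k
    have hij : i < k := by
      obtain ⟨hk2, _, _⟩ := PySem.List.getElem_of_index?_eq_some hidx
      simp only [List.length_map, List.length_take] at hk2
      omega
    have hsplit : ps = ps.take k ++ ps[k] :: ps.drop (k + 1) := by
      conv_lhs => rw [← List.take_append_drop k ps]
      rw [List.drop_eq_getElem_cons hj]
    calc ps.foldl stepP []
        = (ps.take k ++ ps[k] :: ps.drop (k + 1)).foldl stepP [] := by rw [← hsplit]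
      _ = (ps[k] :: ps.drop (k + 1)).foldl stepP (ps.take k) := by
            rw [List.foldl_append, foldP_nodup _ [] (by simpa using hnd), List.nil_append]
      _ = (ps.drop (k + 1)).foldl stepP (ps.take (i + 1)) := by
            rw [List.foldl_cons]
            simp only [stepP, hidx]
            rw [List.take_take, Nat.min_eq_left (by omega)]
      _ = (ps.take (i + 1) ++ ps.drop (k + 1)).foldl stepP [] := by
            rw [List.foldl_append, foldP_nodup _ []
              (by
                have h2 : ps.take (i + 1) = (ps.take k).take (i + 1) := by
                  rw [List.take_take, Nat.min_eq_left (by omega)]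
                rw [List.nil_append, h2, List.map_take]
                exact List.Nodup.sublist (List.take_sublist _ _) hnd), List.nil_append]
      _ = rlLoop (ps.take (i + 1) ++ ps.drop (k + 1)) :=
            loop_eq (ps.take (i + 1) ++ ps.drop (k + 1))
termination_by ps.length
decreasing_by
  simp only [List.length_append, List.length_take, List.length_drop]
  omega

-- ===== VERDICT (by name: the statement is the Claim_ definition above) =====
theorem remove_loops_spec : Claim_equal_remove_loops := by
  intro arr _
  unfold Spec_remove_loops remove_loops remove_loops_alt
  have := bridgeA (PySem.List.enumerate arr) []
  simp only [List.map_nil] at this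
  rw [this, loop_eq]
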